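-- pv_equiv track=rewrite | github.com/krnets/codewars-practice | 6kyu/Sorting Time/kata.py | sort_time
-- ===== SOURCE A (Python) =====
-- def sort_time(arr):
--     arr.sort(key=lambda p: p[0])
--     res = []
--     prev = "00:00"
--
--     while arr:
--         i = next((i for i, period in enumerate(arr) if period[0] >= prev), 0)
--         res.append(arr.pop(i))
--         prev = res[-1][-1]
--
--     return res
-- ===== SOURCE B (Python) =====
-- def _bisect_left(keys, x):
--     lo, hi = 0, len(keys)
--     while lo < hi:
--         mid = (lo + hi) // 2
--         if keys[mid] < x:
--             lo = mid + 1
--         else: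
--             hi = mid
--     return lo
--
--
-- def sort_time(arr):
--     # Equivalence is about the return value: A sorts/empties arr in place, B leaves it untouched.
--     items = sorted(arr, key=lambda p: p[0])
--     keys = [p[0] for p in items]
--     res = []
--     prev = "00:00"
--     while items:
--         i = _bisect_left(keys, prev)
--         if i == len(items):
--             i = 0
--         res.append(items.pop(i))
--         keys.pop(i)
--         prev = res[-1][-1]
--     return res
-- ===== Notes on version B (the rewrite author's own statement) =====
-- stated objective: alternative
-- what changed: Replaces the per-step linear scan of the sorted remainder (enumerate + next) by a hand-written binary search (bisect_left) over a parallel, always-sorted key list, popping from both lists; B also does not mutate the caller's list.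
import Mathlib
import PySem

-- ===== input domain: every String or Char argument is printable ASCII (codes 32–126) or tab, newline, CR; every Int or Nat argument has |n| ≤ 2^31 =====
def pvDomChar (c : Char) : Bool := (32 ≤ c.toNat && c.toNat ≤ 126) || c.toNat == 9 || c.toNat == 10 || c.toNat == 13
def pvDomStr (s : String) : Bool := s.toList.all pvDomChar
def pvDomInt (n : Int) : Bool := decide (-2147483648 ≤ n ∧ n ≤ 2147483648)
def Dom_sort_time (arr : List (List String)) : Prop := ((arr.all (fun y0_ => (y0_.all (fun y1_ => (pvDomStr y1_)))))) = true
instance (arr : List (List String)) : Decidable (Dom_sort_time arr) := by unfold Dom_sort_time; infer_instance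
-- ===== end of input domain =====

-- B replaces A's per-step linear scan with a binary search over a parallel sorted key list (return value only: the Python A mutates arr in place, B does not).


-- ===== PORT A =====
-- while arr: i = next((i for i,period in enumerate(arr) if period[0] >= prev), 0); res.append(arr.pop(i)); prev = res[-1][-1]
-- fuel = initial length of arr (the loop pops exactly one element per iteration).
-- p[0] / p[-1] are ported as headD "" / getLastD ""; Pre_ excludes the empty inner lists on which Python raises.
def pvLoopA : Nat → List (List String) → String → List (List String)
  | 0, _, _ => []
  | n+1, arr, prev =>
    if arr.isEmpty then [] else
      let i := (List.findIdx? (fun p => decide (prev ≤ p.headD "")) arr).getD 0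
      let p := arr.getD i []
      p :: pvLoopA n (arr.eraseIdx i) (p.getLastD "")

def sort_time (arr : List (List String)) : List (List String) :=
  let s := PySem.List.sorted arr (fun p => p.headD "")
  pvLoopA s.length s "00:00"

-- ===== PORT B =====
-- hand-written bisect_left from Source B: while lo < hi: mid=(lo+hi)//2; ...  (fuel = len keys bounds the iterations)
def pvBisectLoop : Nat → List String → String → Nat → Nat → Nat
  | 0, _, _, lo, _ => lo
  | n+1, keys, x, lo, hi =>
    if lo < hi then
      let mid := (lo + hi) / 2
      if keys.getD mid "" < x then pvBisectLoop n keys x (mid+1) hi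
      else pvBisectLoop n keys x lo mid
    else lo

def pvBisectB (keys : List String) (x : String) : Nat :=
  pvBisectLoop keys.length keys x 0 keys.length

-- while items: i = bisect_left(keys, prev); if i == len(items): i = 0; pop from items and keys
def pvLoopB : Nat → List (List String) → List String → String → List (List String)
  | 0, _, _, _ => []
  | n+1, items, keys, prev =>
    if items.isEmpty then [] else
      let i0 := pvBisectB keys prev
      let i := if i0 = items.length then 0 else i0
      let p := items.getD i []
      p :: pvLoopB n (items.eraseIdx i) (keys.eraseIdx i) (p.getLastD "")

def sort_time_alt (arr : List (List String)) : List (List String) :=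
  let items := PySem.List.sorted arr (fun p => p.headD "")
  pvLoopB items.length items (items.map (fun p => p.headD "")) "00:00"

-- ===== PRECONDITION & SPEC =====
-- Pre_ excludes inputs containing an empty inner list: on those Python A raises IndexError (p[0] in the sort key).
def Pre_sort_time (arr : List (List String)) : Prop := ∀ p ∈ arr, p ≠ []
instance (arr : List (List String)) : Decidable (Pre_sort_time arr) := by unfold Pre_sort_time; infer_instance
def pvWitness_sort_time : List (List String) := [["09:00", "10:00"], ["08:00", "09:30"]]

def Spec_sort_time (arr : List (List String)) (out : List (List String)) : Prop := out = sort_time_alt arr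
instance (arr : List (List String)) (out : List (List String)) : Decidable (Spec_sort_time arr out) := by unfold Spec_sort_time; infer_instance

-- ===== CLAIM (what is proved, stated in full; the proofs are below) =====
def Claim_equal_sort_time : Prop := ∀ (arr : List (List String)), Dom_sort_time arr → Pre_sort_time arr → Spec_sort_time arr (sort_time arr)

-- ===== LEMMAS AND PROOFS =====

-- the binary-search loop of B returns an index r with: everything before r is < x, everything from r on is ≥ x
theorem pvBisectLoop_spec (keys : List String) (x : String)
    (hs : keys.Pairwise (· ≤ ·)) :
    ∀ (fuel lo hi : Nat), lo ≤ hi → hi ≤ keys.length → hi - lo ≤ fuel →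
    (∀ j (hj : j < keys.length), j < lo → keys[j] < x) →
    (∀ j (hj : j < keys.length), hi ≤ j → x ≤ keys[j]) →
    (∀ j (hj : j < keys.length), j < pvBisectLoop fuel keys x lo hi → keys[j] < x) ∧
    (∀ j (hj : j < keys.length), pvBisectLoop fuel keys x lo hi ≤ j → x ≤ keys[j]) ∧
    pvBisectLoop fuel keys x lo hi ≤ keys.length := by
  have hmono : ∀ (i j : Nat) (hi : i < keys.length) (hj : j < keys.length),
      i ≤ j → keys[i] ≤ keys[j] := by
    intro i j hi hj hij
    by_cases hij' : i = j
    · subst hij'; exact le_rfl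
    · exact List.pairwise_iff_getElem.mp hs i j hi hj (by omega)
  intro fuel
  induction fuel with
  | zero =>
    intro lo hi hlo hhi hfuel hb ha
    simp only [pvBisectLoop]
    exact ⟨hb, fun j hj h => ha j hj (by omega), by omega⟩
  | succ n ih =>
    intro lo hi hlo hhi hfuel hb ha
    simp only [pvBisectLoop]
    by_cases hc : lo < hi
    · simp only [if_pos hc]
      have hmhi : (lo + hi) / 2 < hi := by omega
      have hmlo : lo ≤ (lo + hi) / 2 := by omega
      have hmlen : (lo + hi) / 2 < keys.length := by omega
      rw [List.getD_eq_getElem keys "" hmlen]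
      by_cases hx : keys[(lo + hi) / 2] < x
      · simp only [if_pos hx]
        refine ih ((lo + hi) / 2 + 1) hi (by omega) hhi (by omega) ?_ ha
        intro j hj hjm
        exact lt_of_le_of_lt (hmono j ((lo + hi) / 2) hj hmlen (by omega)) hx
      · simp only [if_neg hx]
        refine ih lo ((lo + hi) / 2) hmlo (by omega) (by omega) hb ?_
        intro j hj hjm
        exact le_trans (not_lt.mp hx) (hmono ((lo + hi) / 2) j hmlen hj hjm)
    · simp only [if_neg hc]
      exact ⟨hb, fun j hj h => ha j hj (by omega), by omega⟩

theorem pvBisectB_eq (keys : List String) (x : String) (hs : keys.Pairwise (· ≤ ·)) :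
    pvBisectB keys x = (keys.findIdx? (fun k => decide (x ≤ k))).getD keys.length := by
  unfold pvBisectB
  obtain ⟨h1, h2, h3⟩ := pvBisectLoop_spec keys x hs keys.length 0 keys.length
    (by omega) le_rfl (by omega)
    (fun j hj h => absurd h (by omega))
    (fun j hj h => absurd hj (by omega))
  cases hf : keys.findIdx? (fun k => decide (x ≤ k)) with
  | none =>
    simp only [Option.getD_none]
    have hall := List.findIdx?_eq_none_iff.mp hf
    by_contra hne
    have hr : pvBisectLoop keys.length keys x 0 keys.length < keys.length :=
      lt_of_le_of_ne h3 hne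
    have hx2 := h2 _ hr le_rfl
    have := hall _ (List.getElem_mem hr)
    simp only [decide_eq_false_iff_not] at this
    exact this hx2
  | some j =>
    simp only [Option.getD_some]
    obtain ⟨hjlen, hpj, hbefore⟩ := List.findIdx?_eq_some_iff_getElem.mp hf
    simp only [decide_eq_true_eq] at hpj
    by_contra hne
    rcases Nat.lt_or_ge (pvBisectLoop keys.length keys x 0 keys.length) j with h | h
    · have hrlen : pvBisectLoop keys.length keys x 0 keys.length < keys.length := by omega
      have hx2 := h2 _ hrlen le_rfl
      have := hbefore _ h
      simp only [decide_eq_true_eq] at this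
      exact this hx2
    · have hjr : j < pvBisectLoop keys.length keys x 0 keys.length := by omega
      exact absurd hpj (not_le.mpr (h1 j hjlen hjr))

theorem pvLoop_eq : ∀ (n : Nat) (items : List (List String)) (prev : String),
    ((items.map (fun p => p.headD "")).Pairwise (· ≤ ·)) →
    pvLoopB n items (items.map (fun p => p.headD "")) prev = pvLoopA n items prev := by
  intro n
  induction n with
  | zero => intro items prev _; rfl
  | succ n ih =>
    intro items prev hpair
    simp only [pvLoopA, pvLoopB]
    by_cases he : items.isEmpty
    · simp only [if_pos he]
    · simp only [if_neg he]
      have hlen : (items.map (fun p => p.headD "")).length = items.length :=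
        List.length_map ..
      have hkey : pvBisectB (items.map fun p => p.headD "") prev
          = ((items.findIdx? (fun p => decide (prev ≤ p.headD ""))).getD items.length) := by
        rw [pvBisectB_eq _ _ hpair, List.findIdx?_map, hlen]
        rfl
      have hieq : (if pvBisectB (items.map fun p => p.headD "") prev = items.length then 0
            else pvBisectB (items.map fun p => p.headD "") prev)
          = (List.findIdx? (fun p => decide (prev ≤ p.headD "")) items).getD 0 := by
        rw [hkey]
        cases hf : List.findIdx? (fun p => decide (prev ≤ p.headD "")) items with
        | none => simp
        | some j =>
          obtain ⟨hjlen, -, -⟩ := List.findIdx?_eq_some_iff_getElem.mp hf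
          simp only [Option.getD_some, if_neg (by omega : ¬ j = items.length)]
      rw [hieq, List.eraseIdx_map]
      congr 1
      refine ih _ _ ?_
      rw [← List.eraseIdx_map]
      exact hpair.sublist (List.eraseIdx_sublist _ _)

-- ===== VERDICT (by name: the statement is the Claim_ definition above) =====
theorem sort_time_spec : Claim_equal_sort_time := by
  intro arr _ _
  unfold Spec_sort_time sort_time sort_time_alt
  exact (pvLoop_eq _ _ _ (PySem.List.sorted_map_key_pairwise arr _)).symm
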